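-- pv_equiv track=rewrite | github.com/sonpt26/pcf-globe26 | pcf-morl/experiments/metrics.py | compute_mvd
-- ===== SOURCE A (Python) =====
-- def compute_mvd(step_infos: list[dict]) -> int:
--     """Max Violation Duration: longest consecutive violation streak."""
--     max_streak = 0
--     current = 0
--     for info in step_infos:
--         if info.get("VR", 0.0) > 0.0:
--             current += 1
--             max_streak = max(max_streak, current)
--         else:
--             current = 0
--     return max_streak
-- ===== SOURCE B (Python) =====
-- def _runs(flags):
--     """Run-length encode a list of booleans into (value, length) pairs."""
--     if not flags:
--         return []
--     out = []
--     cur, n = flags[0], 1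
--     for f in flags[1:]:
--         if f == cur:
--             n += 1
--         else:
--             out.append((cur, n))
--             cur, n = f, 1
--     out.append((cur, n))
--     return out
--
-- def compute_mvd(step_infos: list[dict]) -> int:
--     """Max Violation Duration: longest consecutive violation streak."""
--     flags = [info.get("VR", 0.0) > 0.0 for info in step_infos]
--     return max((n for f, n in _runs(flags) if f), default=0)
-- ===== Notes on version B (the rewrite author's own statement) =====
-- stated objective: alternative
-- what changed: Replaces the running-counter-with-max loop by run-length encoding the violation flags and taking the maximum length of the True runs.
import Mathlib
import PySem

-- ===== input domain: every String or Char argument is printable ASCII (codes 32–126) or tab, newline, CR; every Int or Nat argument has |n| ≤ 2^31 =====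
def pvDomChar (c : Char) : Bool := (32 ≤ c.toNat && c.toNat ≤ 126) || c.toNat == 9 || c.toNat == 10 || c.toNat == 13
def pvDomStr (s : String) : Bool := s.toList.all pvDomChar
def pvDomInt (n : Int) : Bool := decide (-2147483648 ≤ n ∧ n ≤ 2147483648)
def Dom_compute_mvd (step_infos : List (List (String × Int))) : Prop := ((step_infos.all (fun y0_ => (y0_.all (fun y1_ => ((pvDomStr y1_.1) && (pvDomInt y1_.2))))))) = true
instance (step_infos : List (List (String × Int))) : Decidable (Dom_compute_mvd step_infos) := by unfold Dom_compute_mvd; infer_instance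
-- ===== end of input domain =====

-- B run-length encodes the violation flags and takes the max length of the True runs (alternative decomposition, not faster).
-- ===== PORT A =====
def compute_mvd (step_infos : List (List (String × Int))) : Int :=
  (step_infos.foldl
    (fun (s : Int × Int) info =>
      if (PySem.Dict.mk info).getD "VR" 0 > 0 then (max s.1 (s.2 + 1), s.2 + 1)
      else (s.1, 0))
    (0, 0)).1

-- ===== PORT B =====
-- _runs inner for-loop (cur/n accumulator over the rest of the flags)
def pvRunsGo (cur : Bool) (n : Int) : List Bool → List (Bool × Int)
  | [] => [(cur, n)]
  | f :: rest => if f = cur then pvRunsGo cur (n + 1) rest else (cur, n) :: pvRunsGo f 1 rest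

def pvRuns : List Bool → List (Bool × Int)
  | [] => []
  | f :: rest => pvRunsGo f 1 rest

def compute_mvd_alt (step_infos : List (List (String × Int))) : Int :=
  let flags := step_infos.map (fun info => decide ((PySem.Dict.mk info).getD "VR" 0 > 0))
  -- max(…, default=0) over the lengths of the True runs
  (pvRuns flags).foldl (fun acc p => if p.1 then max acc p.2 else acc) 0

-- ===== PRECONDITION & SPEC =====
def Spec_compute_mvd (step_infos : List (List (String × Int))) (out : Int) : Prop := out = compute_mvd_alt step_infos
instance (step_infos : List (List (String × Int))) (out : Int) : Decidable (Spec_compute_mvd step_infos out) := by unfold Spec_compute_mvd; infer_instance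

-- ===== CLAIM (what is proved, stated in full; the proofs are below) =====
def Claim_equal_compute_mvd : Prop := ∀ (step_infos : List (List (String × Int))), Dom_compute_mvd step_infos → Spec_compute_mvd step_infos (compute_mvd step_infos)

-- ===== LEMMAS AND PROOFS =====

-- "best streak of fs when the current run of Trues entering fs already has length c"
def pvBestc (c : Int) : List Bool → Int
  | [] => c
  | true :: fs => pvBestc (c + 1) fs
  | false :: fs => max c (pvBestc 0 fs)

theorem pvBestc_ge (c : Int) (fs : List Bool) : c ≤ pvBestc c fs := by
  induction fs generalizing c with
  | nil => simp [pvBestc]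
  | cons f fs ih =>
    cases f
    · exact le_trans (le_max_left c (pvBestc 0 fs)) (le_of_eq rfl)
    · exact le_trans (by omega) (ih (c + 1))

-- A's loop on the flag list equals max m (pvBestc c fs), given the loop invariant 0 ≤ c ≤ m
theorem pvfoldA_eq (fs : List Bool) : ∀ m c : Int, 0 ≤ c → c ≤ m →
    (fs.foldl (fun (s : Int × Int) f => if f then (max s.1 (s.2 + 1), s.2 + 1) else (s.1, 0)) (m, c)).1
      = max m (pvBestc c fs) := by
  induction fs with
  | nil => intro m c _ h; simp [pvBestc]; omega
  | cons f fs ih =>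
    intro m c hc hm
    cases f
    · have h := ih m 0 le_rfl (by omega)
      simp only [List.foldl_cons, Bool.false_eq_true, if_false, pvBestc]
      rw [h]; omega
    · have h1 := ih (max m (c + 1)) (c + 1) (by omega) (le_max_right _ _)
      have h2 := pvBestc_ge (c + 1) fs
      simp only [List.foldl_cons, if_true, pvBestc]
      rw [h1]; omega

-- B's fold over the run-length encoding equals pvBestc (joint statement: a True run in
-- progress of length c / a False run in progress)
theorem pvRunsGo_eq (fs : List Bool) :
    (∀ c acc : Int, 0 ≤ c → 0 ≤ acc →
      (pvRunsGo true c fs).foldl (fun acc p => if p.1 then max acc p.2 else acc) acc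
        = max acc (pvBestc c fs)) ∧
    (∀ n acc : Int, 0 ≤ acc →
      (pvRunsGo false n fs).foldl (fun acc p => if p.1 then max acc p.2 else acc) acc
        = max acc (pvBestc 0 fs)) := by
  induction fs with
  | nil =>
    constructor
    · intro c acc _ _; simp [pvRunsGo, pvBestc]
    · intro n acc h; simp [pvRunsGo, pvBestc]; omega
  | cons f fs ih =>
    obtain ⟨ihT, ihF⟩ := ih
    constructor
    · intro c acc hc hacc
      cases f
      · have h := ihF 1 (max acc c) (by omega)
        simp only [pvRunsGo, Bool.false_eq_true, if_false, List.foldl_cons, if_true, pvBestc]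
        rw [h]; omega
      · have h := ihT (c + 1) acc (by omega) hacc
        simpa [pvRunsGo, pvBestc] using h
    · intro n acc hacc
      cases f
      · have h := ihF (n + 1) acc hacc
        have h0 := pvBestc_ge 0 fs
        simp only [pvRunsGo, if_true, pvBestc]
        rw [h]; omega
      · have h := ihT 1 acc (by omega) hacc
        simp only [pvRunsGo, Bool.true_eq_false, if_false, List.foldl_cons,
          Bool.false_eq_true, pvBestc, zero_add]
        rw [h]

theorem pvAlt_eq (fs : List Bool) :
    (pvRuns fs).foldl (fun acc p => if p.1 then max acc p.2 else acc) 0 = pvBestc 0 fs := by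
  cases fs with
  | nil => simp [pvRuns, pvBestc]
  | cons f fs =>
    cases f
    · have h := (pvRunsGo_eq fs).2 1 0 le_rfl
      have h0 := pvBestc_ge 0 fs
      simp only [pvRuns, pvBestc]
      rw [h]
    · have h := (pvRunsGo_eq fs).1 1 0 (by omega) le_rfl
      have h2 := pvBestc_ge 1 fs
      simp only [pvRuns, pvBestc, zero_add]
      rw [h]; omega

-- ===== VERDICT (by name: the statement is the Claim_ definition above) =====
theorem compute_mvd_spec : Claim_equal_compute_mvd := by
  intro step_infos _
  unfold Spec_compute_mvd compute_mvd compute_mvd_alt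
  have h := pvfoldA_eq (step_infos.map (fun info => decide ((PySem.Dict.mk info).getD "VR" 0 > 0)))
      0 0 le_rfl le_rfl
  rw [List.foldl_map] at h
  simp only [decide_eq_true_eq] at h
  have h0 := pvBestc_ge 0 (step_infos.map (fun info => decide ((PySem.Dict.mk info).getD "VR" 0 > 0)))
  rw [pvAlt_eq, h]
  omega
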